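-- pv_equiv track=rewrite | github.com/moonlessdark/JiuYinDance | deskPage/bussinese/dance/findPicBySmallToBigger/findButton.py | sort_button
-- ===== SOURCE A (Python) =====
-- def sort_button(button_dict: dict):
--     """
--     给按钮排序
--     :param button_dict:
--     :return:
--     """
--     x_list: list = []
--     button_key_list = []
--     if len(button_dict) > 0:
--         for key in button_dict:
--             for b in button_dict.get(key):
--                 x_list.append(b)
--         x_list.sort()  # 排序一下，默认按从小打到
--         for n in x_list:
--             for kk, vv in button_dict.items():
--                 if n in vv:  # 如果该坐标在这个key的value数组中
--                     button_key_list.append(kk)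
--     return button_key_list
-- ===== SOURCE B (Python) =====
-- def sort_button(button_dict: dict):
--     occ = {}          # coordinate value -> keys (in dict order) whose list contains it
--     all_vals = []     # every coordinate occurrence
--     for key, vals in button_dict.items():
--         all_vals.extend(vals)
--         for v in set(vals):
--             occ.setdefault(v, []).append(key)
--     out = []
--     for n in sorted(all_vals):
--         out.extend(occ[n])
--     return out
-- ===== Notes on version B (the rewrite author's own statement) =====
-- stated objective: faster
-- what changed: Instead of re-scanning every dict entry for each of the T sorted coordinates (membership test per entry), B builds once a value->keys map and the flat coordinate list, sorts it, and extends the output by a single map lookup per coordinate.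
import Mathlib
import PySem

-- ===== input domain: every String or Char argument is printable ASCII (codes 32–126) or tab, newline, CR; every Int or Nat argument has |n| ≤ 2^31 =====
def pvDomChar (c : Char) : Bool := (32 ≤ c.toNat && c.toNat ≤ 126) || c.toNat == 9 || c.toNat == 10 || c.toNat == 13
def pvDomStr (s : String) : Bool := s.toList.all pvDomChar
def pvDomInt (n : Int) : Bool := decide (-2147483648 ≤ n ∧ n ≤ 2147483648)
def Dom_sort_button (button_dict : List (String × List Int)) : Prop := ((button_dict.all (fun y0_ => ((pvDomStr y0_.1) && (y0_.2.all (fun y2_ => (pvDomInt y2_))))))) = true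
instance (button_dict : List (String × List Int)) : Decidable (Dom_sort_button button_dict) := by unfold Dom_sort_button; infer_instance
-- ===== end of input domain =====

-- B replaces A's per-coordinate scan over all dict entries by a precomputed value→keys map: asymptotically faster, same return value.

-- ===== PORT A =====
def sort_button (button_dict : List (String × List Int)) : List String :=
  let d := PySem.Dict.ofList button_dict
  if d.size > 0 then
    let x_list := d.keys.foldl (fun acc key => (d.getD key []).foldl (fun a b => a ++ [b]) acc) []
    let x_sorted := PySem.List.sorted x_list (fun x => x) false
    x_sorted.foldl (fun acc n =>
      d.items.foldl (fun acc2 kv => if n ∈ kv.2 then acc2 ++ [kv.1] else acc2) acc) []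
  else []

-- ===== PORT B =====
def sort_button_alt (button_dict : List (String × List Int)) : List String :=
  let d := PySem.Dict.ofList button_dict
  let st := d.items.foldl
    (fun (st : PySem.Dict Int (List String) × List Int) kv =>
      ((PySem.Set.ofList kv.2).foldl (fun o v => o.modify v [] (· ++ [kv.1])) st.1,
       st.2 ++ kv.2))
    (PySem.Dict.empty, [])
  (PySem.List.sorted st.2 (fun x => x) false).foldl (fun acc n => acc ++ st.1.getD n []) []

-- ===== PRECONDITION & SPEC =====
def Spec_sort_button (button_dict : List (String × List Int)) (out : List String) : Prop := out = sort_button_alt button_dict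
instance (button_dict : List (String × List Int)) (out : List String) : Decidable (Spec_sort_button button_dict out) := by unfold Spec_sort_button; infer_instance

-- ===== CLAIM (what is proved, stated in full; the proofs are below) =====
def Claim_equal_sort_button : Prop := ∀ (button_dict : List (String × List Int)), Dom_sort_button button_dict → Spec_sort_button button_dict (sort_button button_dict)

-- ===== LEMMAS AND PROOFS =====

-- folding modify over a duplicate-free value list appends the key exactly where the value occurs
lemma setfold_getD (s : List Int) (hs : s.Nodup) (k : String)
    (o : PySem.Dict Int (List String)) (n : Int) :
    ((s.foldl (fun o v => o.modify v [] (· ++ [k])) o).getD n [])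
      = if n ∈ s then o.getD n [] ++ [k] else o.getD n [] := by
  induction s generalizing o with
  | nil => simp
  | cons v t ih =>
    rcases List.nodup_cons.mp hs with ⟨hv, ht⟩
    rw [List.foldl_cons, ih ht, PySem.Dict.getD_modify]
    by_cases hnv : n = v
    · subst hnv; simp [hv]
    · simp [hnv, List.mem_cons]

-- the value→keys map looks up exactly the keys whose value list contains n, in entry order
lemma occ_getD (l : List (String × List Int)) (o : PySem.Dict Int (List String)) (n : Int) :
    ((l.foldl (fun o kv => (PySem.Set.ofList kv.2).foldl (fun o v => o.modify v [] (· ++ [kv.1])) o) o).getD n [])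
      = o.getD n [] ++ (l.filter (fun kv => decide (n ∈ kv.2))).map (·.1) := by
  induction l generalizing o with
  | nil => simp
  | cons kv t ih =>
    simp only [List.foldl_cons, ih]
    rw [setfold_getD _ (PySem.Set.nodup_ofList kv.2)]
    by_cases hm : n ∈ kv.2
    · simp [PySem.Set.mem_ofList, hm]
    · simp [PySem.Set.mem_ofList, hm]

-- ===== VERDICT (by name: the statement is the Claim_ definition above) =====
theorem sort_button_spec : Claim_equal_sort_button := by
  intro button_dict _
  unfold Spec_sort_button sort_button sort_button_alt
  dsimp only
  have hnd : (PySem.Dict.ofList button_dict).keys.Nodup :=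
    PySem.Dict.nodup_keys_ofList button_dict
  rw [PySem.List.foldl_prod_mk
        (f := fun (o : PySem.Dict Int (List String)) (kv : String × List Int) =>
          (PySem.Set.ofList kv.2).foldl (fun o v => o.modify v [] (· ++ [kv.1])) o)
        (g := fun (acc : List Int) (kv : String × List Int) => acc ++ kv.2)]
  split_ifs with h0
  · -- A's flattened value list equals B's
    have hx : (PySem.Dict.ofList button_dict).keys.foldl
          (fun acc key => ((PySem.Dict.ofList button_dict).getD key []).foldl (fun a b => a ++ [b]) acc) []
        = (PySem.Dict.ofList button_dict).items.foldl (fun acc kv => acc ++ kv.2) [] := by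
      have hk : (PySem.Dict.ofList button_dict).keys
          = (PySem.Dict.ofList button_dict).items.map (·.1) := rfl
      rw [hk, List.foldl_map]
      refine PySem.List.foldl_congr_mem' _ _ _ _ ?_
      intro kv hkv acc
      obtain ⟨k, vs⟩ := kv
      rw [PySem.List.foldl_append_singleton_eq_self,
          PySem.Dict.getD_of_mem_items _ hkv hnd]
    rw [hx]
    dsimp only
    -- both outer folds agree pointwise
    refine PySem.List.foldl_congr_mem' _ _ _ _ ?_
    intro n hn acc
    rw [PySem.List.foldl_append_ite (p := fun kv : String × List Int => n ∈ kv.2) (f := (·.1)),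
        occ_getD]
    simp
  · -- empty dict: both sides are []
    have hlen : (PySem.Dict.ofList button_dict).items.length = 0 := by
      simp only [PySem.Dict.size] at h0; omega
    rw [List.eq_nil_of_length_eq_zero hlen]
    simp [PySem.List.sorted]
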